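-- pv_equiv track=rewrite | github.com/Ollson2921/CayleyPerms | decorated_patterns/decorated_pattern.py | _col_values
-- ===== SOURCE A (Python) =====
-- def _col_values(
--     word: tuple[int, ...], occ: tuple[int, ...]
-- ) -> list[tuple[int, int]]:
--     if len(occ) == 0:
--         return [(0, len(word) + 1)]
--     col_values = [(0, occ[0])]
--     for idx1, idx2 in zip(occ, occ[1:]):
--         col_values.append((idx1, idx1 + 1))
--         col_values.append((idx1 + 1, idx2))
--     col_values.append((occ[-1], occ[-1] + 1))
--     col_values.append((occ[-1] + 1, len(word)))
--     return col_values
-- ===== SOURCE B (Python) =====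
-- def _col_values(
--     word: tuple[int, ...], occ: tuple[int, ...]
-- ) -> list[tuple[int, int]]:
--     if len(occ) == 0:
--         return [(0, len(word) + 1)]
--     pts = [0]
--     for idx in occ:
--         pts.append(idx)
--         pts.append(idx + 1)
--     pts.append(len(word))
--     return list(zip(pts, pts[1:]))
-- ===== Notes on version B (the rewrite author's own statement) =====
-- stated objective: simpler
-- what changed: B builds one flat list of breakpoints (0, then idx and idx+1 for each occurrence, then len(word)) and pairs consecutive breakpoints with zip, replacing A's pairwise-window loop with its dual appends plus two trailing appends.
import Mathlib
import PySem

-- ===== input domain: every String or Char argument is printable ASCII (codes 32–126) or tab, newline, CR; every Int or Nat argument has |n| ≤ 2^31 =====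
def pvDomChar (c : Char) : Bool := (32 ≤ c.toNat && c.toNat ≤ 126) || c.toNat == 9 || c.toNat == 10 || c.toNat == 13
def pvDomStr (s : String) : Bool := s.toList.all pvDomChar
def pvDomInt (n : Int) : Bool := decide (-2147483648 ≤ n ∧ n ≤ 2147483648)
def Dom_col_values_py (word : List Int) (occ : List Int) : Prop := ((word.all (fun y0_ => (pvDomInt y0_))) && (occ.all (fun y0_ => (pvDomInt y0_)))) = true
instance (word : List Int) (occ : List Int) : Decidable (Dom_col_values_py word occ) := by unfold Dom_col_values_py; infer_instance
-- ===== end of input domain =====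

-- B replaces A's pairwise-window loop (dual appends per adjacent pair, plus two trailing
-- appends) by a flat breakpoint list paired up with zip — objective: simpler decomposition.


-- ===== PORT A =====
-- transliteration of A: empty guard, initial (0, occ[0]), loop over zip(occ, occ[1:])
-- appending two windows per adjacent pair, then the two trailing appends with occ[-1].
def col_values_py (word : List Int) (occ : List Int) : List (Int × Int) :=
  match occ with
  | [] => [((0 : Int), (word.length : Int) + 1)]
  | o0 :: rest =>
    let cv : List (Int × Int) := [((0 : Int), o0)]
    let cv := (List.zip (o0 :: rest) rest).foldl
      (fun acc (p : Int × Int) => acc ++ [(p.1, p.1 + 1), (p.1 + 1, p.2)]) cv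
    let last := (o0 :: rest).getLast (by simp)
    cv ++ [(last, last + 1), (last + 1, (word.length : Int))]

-- ===== PORT B =====
-- transliteration of B: breakpoints 0, (idx, idx+1 for each idx), len(word); zip pts pts[1:].
def col_values_py_alt (word : List Int) (occ : List Int) : List (Int × Int) :=
  if occ.length = 0 then [((0 : Int), (word.length : Int) + 1)]
  else
    let pts : List Int :=
      (0 : Int) :: (occ.foldl (fun acc idx => acc ++ [idx, idx + 1]) [] ++ [(word.length : Int)])
    List.zip pts pts.tail

-- ===== PRECONDITION & SPEC =====
def Spec_col_values_py (word : List Int) (occ : List Int) (out : List (Int × Int)) : Prop := out = col_values_py_alt word occ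
instance (word : List Int) (occ : List Int) (out : List (Int × Int)) : Decidable (Spec_col_values_py word occ out) := by unfold Spec_col_values_py; infer_instance

-- ===== CLAIM (what is proved, stated in full; the proofs are below) =====
def Claim_equal_col_values_py : Prop := ∀ (word : List Int) (occ : List Int), Dom_col_values_py word occ → Spec_col_values_py word occ (col_values_py word occ)

-- ===== LEMMAS AND PROOFS =====

-- pairing consecutive elements
def pvPairs (xs : List Int) : List (Int × Int) := List.zip xs xs.tail

theorem pvPairs_cons_cons (a b : Int) (l : List Int) :
    pvPairs (a :: b :: l) = (a, b) :: pvPairs (b :: l) := by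
  simp [pvPairs]

-- B's foldl builds the flat breakpoint list
theorem flat_foldl (occ : List Int) (acc : List Int) :
    occ.foldl (fun acc idx => acc ++ [idx, idx + 1]) acc
      = acc ++ occ.flatMap (fun idx => [idx, idx + 1]) := by
  induction occ generalizing acc with
  | nil => simp
  | cons o rest ih => simp [List.foldl, ih, List.flatMap_cons]

-- the main invariant of A's loop: for any accumulator, the loop plus the two trailing
-- appends equals acc followed by the consecutive pairing of the remaining breakpoints
theorem loop_main (rest : List Int) (o0 n : Int) (acc : List (Int × Int)) :
    (List.zip (o0 :: rest) rest).foldl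
        (fun acc (p : Int × Int) => acc ++ [(p.1, p.1 + 1), (p.1 + 1, p.2)]) acc
      ++ [((o0 :: rest).getLast (by simp), (o0 :: rest).getLast (by simp) + 1),
          ((o0 :: rest).getLast (by simp) + 1, n)]
      = acc ++ pvPairs (o0 :: (o0 + 1) :: (rest.flatMap (fun idx => [idx, idx + 1]) ++ [n])) := by
  induction rest generalizing o0 acc with
  | nil => simp [pvPairs]
  | cons o1 rest' ih =>
      have h := ih o1 (acc ++ [(o0, o0 + 1), (o0 + 1, o1)])
      simp only [List.zip_cons_cons, List.foldl_cons, List.getLast_cons_cons] at h ⊢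
      rw [h]
      simp [List.flatMap_cons, pvPairs_cons_cons]

-- ===== VERDICT (by name: the statement is the Claim_ definition above) =====
theorem col_values_py_spec : Claim_equal_col_values_py := by
  intro word occ _
  show col_values_py word occ = col_values_py_alt word occ
  cases occ with
  | nil => simp [col_values_py, col_values_py_alt]
  | cons o0 rest =>
      unfold col_values_py col_values_py_alt
      simp only [List.length_cons, Nat.succ_ne_zero, reduceIte]
      rw [loop_main rest o0 (word.length : Int) [((0 : Int), o0)]]
      rw [flat_foldl]
      simp [pvPairs, List.flatMap_cons]
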